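-- pv_equiv track=rewrite | github.com/cushonz/TA-Scheduling-Algorithm | code_demos/assignTA.py | dayMap
-- ===== SOURCE A (Python) =====
-- def dayMap(days):
-- 	rep = set([])
-- 	i = 0
-- 	for letter in days:
-- 		if i > 3 :
-- 			i-=1
-- 		if i > 4 :
-- 			return rep
-- 		else:
-- 			if (letter != " "):
-- 				rep.add(i)
-- 				i+=1
--
-- 			else:
--
-- 				i+=1
-- 	return rep
-- ===== SOURCE B (Python) =====
-- def dayMap(days):
--     rep = set()
--     for i in range(min(len(days), 3)):
--         if days[i] != ' ':
--             rep.add(i)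
--     if any(c != ' ' for c in days[3:]):
--         rep.add(3)
--     return rep
-- ===== Notes on version B (the rewrite author's own statement) =====
-- stated objective: simpler
-- what changed: Replaced the stateful decrement-counter single pass (with its dead early-return branch) by two plain phases: indices of the first three non-space characters, plus 3 if any() finds a non-space in the tail.
import Mathlib
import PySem

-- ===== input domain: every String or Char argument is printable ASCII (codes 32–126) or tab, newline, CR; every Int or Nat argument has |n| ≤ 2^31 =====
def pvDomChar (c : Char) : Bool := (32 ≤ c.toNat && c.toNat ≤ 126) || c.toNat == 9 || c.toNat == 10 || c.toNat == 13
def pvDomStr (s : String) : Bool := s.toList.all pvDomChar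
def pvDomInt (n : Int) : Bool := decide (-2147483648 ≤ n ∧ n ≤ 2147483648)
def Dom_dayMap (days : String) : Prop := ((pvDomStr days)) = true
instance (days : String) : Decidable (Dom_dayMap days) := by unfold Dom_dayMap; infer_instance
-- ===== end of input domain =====

-- B replaces A's stateful decrement-counter single pass (with its dead early-return branch) by two
-- plain phases — indices of the first three non-space characters, plus 3 if the tail has a non-space
-- (objective: simpler; no speed claim).

-- ===== PORT A =====
-- A's loop, step for step: state (rep, i); 'if i > 3: i -= 1'; the (dead) 'if i > 4: return rep';
-- else add i when letter != ' '; i += 1 on both branches.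
def dayMapLoopA : List Char → PySem.Set Int → Int → PySem.Set Int
  | [], rep, _ => rep
  | letter :: rest, rep, i =>
    let i' := if i > 3 then i - 1 else i
    if i' > 4 then rep
    else if letter ≠ ' ' then dayMapLoopA rest (PySem.Set.add rep i') (i' + 1)
    else dayMapLoopA rest rep (i' + 1)

def dayMap (days : String) : List Int := dayMapLoopA days.toList PySem.Set.empty 0

-- ===== PORT B =====
-- B: rep = {i for i in range(min(len(days), 3)) if days[i] != ' '}; then add 3 if any(c != ' ' for c in days[3:]).
-- days[i] is always in range here, so pyGet? is some; '.getD' merely discharges the Option (exact).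
def dayMap_alt (days : String) : List Int :=
  let cs := days.toList
  let rep := (PySem.List.pyRange 0 (min (Int.ofNat cs.length) 3) 1).foldl
    (fun (s : PySem.Set Int) i =>
      if (PySem.List.pyGet? cs i).getD ' ' ≠ ' ' then PySem.Set.add s i else s)
    PySem.Set.empty
  if (PySem.List.slice cs (some 3) none).any (fun c => c ≠ ' ') then PySem.Set.add rep 3 else rep

-- ===== PRECONDITION & SPEC =====
def Spec_dayMap (days : String) (out : List Int) : Prop := out = dayMap_alt days
instance (days : String) (out : List Int) : Decidable (Spec_dayMap days out) := by unfold Spec_dayMap; infer_instance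

-- ===== CLAIM (what is proved, stated in full; the proofs are below) =====
def Claim_equal_dayMap : Prop := ∀ (days : String), Dom_dayMap days → Spec_dayMap days (dayMap days)

-- ===== LEMMAS AND PROOFS =====

-- From counter value 4 on, A's loop just re-adds index 3 at every non-space character.
lemma dayMapLoopA_four (cs : List Char) (rep : PySem.Set Int) :
    dayMapLoopA cs rep 4 = if cs.any (fun c => c ≠ ' ') then PySem.Set.add rep 3 else rep := by
  induction cs generalizing rep with
  | nil => simp [dayMapLoopA]
  | cons c rest ih =>
    by_cases hc : c = ' '
    · subst hc
      simp [dayMapLoopA, ih]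
    · simp [dayMapLoopA, hc, ih]

-- Same from counter value 3 (the counter moves 3 → 4 and then stays at 4).
lemma dayMapLoopA_three (cs : List Char) (rep : PySem.Set Int) :
    dayMapLoopA cs rep 3 = if cs.any (fun c => c ≠ ' ') then PySem.Set.add rep 3 else rep := by
  cases cs with
  | nil => simp [dayMapLoopA]
  | cons c rest =>
    by_cases hc : c = ' '
    · subst hc
      simp [dayMapLoopA, dayMapLoopA_four]
    · simp [dayMapLoopA, hc, dayMapLoopA_four]

lemma dayMap_eq_alt (days : String) :
    dayMapLoopA days.toList PySem.Set.empty 0 = dayMap_alt days := by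
  unfold dayMap_alt
  generalize days.toList = cs
  match cs with
  | [] => simp [dayMapLoopA, PySem.List.pyRange, PySem.List.slice]
  | [a] =>
    have hr : PySem.List.pyRange 0 1 = [0] := by decide
    by_cases ha : a = ' ' <;>
      simp [dayMapLoopA, ha, hr, PySem.List.slice, PySem.List.pyGet?,
        PySem.List.pyIdx?, PySem.Set.add, PySem.Set.contains, PySem.Set.empty]
  | [a, b] =>
    have hr : PySem.List.pyRange 0 2 = [0, 1] := by decide
    by_cases ha : a = ' ' <;> by_cases hb : b = ' ' <;>
      simp [dayMapLoopA, ha, hb, hr, PySem.List.slice, PySem.List.pyGet?,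
        PySem.List.pyIdx?, PySem.Set.add, PySem.Set.contains, PySem.Set.empty]
  | a :: b :: c :: rest =>
    have hmin : min (Int.ofNat (a :: b :: c :: rest).length) 3 = 3 := by
      simp; omega
    have hr : PySem.List.pyRange 0 3 = [0, 1, 2] := by decide
    have hs : PySem.List.slice (a :: b :: c :: rest) (some 3) none = rest := by
      rw [PySem.List.slice_from _ (by norm_num)]
      simp
    have hg0 : PySem.List.pyGet? (a :: b :: c :: rest) (0 : Int) = some a := by
      have h : (0 : Int) ≤ ↑rest.length + 1 + 1 := by omega
      simp [PySem.List.pyGet?, PySem.List.pyIdx?, h]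
    have hg1 : PySem.List.pyGet? (a :: b :: c :: rest) (1 : Int) = some b := by
      have h : (0 : Int) ≤ ↑rest.length + 1 := by omega
      simp [PySem.List.pyGet?, PySem.List.pyIdx?, h]
    have hg2 : PySem.List.pyGet? (a :: b :: c :: rest) (2 : Int) = some c := by
      have h : (2 : Int) ≤ ↑rest.length + 1 + 1 := by omega
      simp [PySem.List.pyGet?, PySem.List.pyIdx?, h]
    simp only [hmin, hr, hs, List.foldl_cons, List.foldl_nil, hg0, hg1, hg2, Option.getD_some]
    by_cases ha : a = ' ' <;> by_cases hb : b = ' ' <;> by_cases hc : c = ' ' <;>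
      simp [dayMapLoopA, ha, hb, hc, dayMapLoopA_three, PySem.Set.add,
        PySem.Set.contains, PySem.Set.empty]

-- ===== VERDICT (by name: the statement is the Claim_ definition above) =====
theorem dayMap_spec : Claim_equal_dayMap := by
  intro days _
  unfold Spec_dayMap dayMap
  exact dayMap_eq_alt days
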